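-- pv_equiv track=rewrite | github.com/Vorapolbig/daily-coding | daily-coding-challenge/07022020.py | solution
-- ===== SOURCE A (Python) =====
-- def solution(string):
--     count = 0
--     balance = 0
--     for s in string:
--         if s == 'R':
--             count += 1
--         else:
--             count -= 1
--         if count == 0:
--             balance += 1
--     return balance
-- ===== SOURCE B (Python) =====
-- def solution(string):
--     # Divide and conquer: go(s, offset) returns (number of prefix positions of s
--     # where the running R/L balance starting from `offset` hits 0, final balance).
--     def go(s, offset):
--         if not s:
--             return 0, offset
--         if len(s) == 1:
--             t = offset + (1 if s == 'R' else -1)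
--             return (1 if t == 0 else 0), t
--         mid = len(s) // 2
--         zl, tl = go(s[:mid], offset)
--         zr, tr = go(s[mid:], tl)
--         return zl + zr, tr
--     return go(string, 0)[0]
-- ===== Notes on version B (the rewrite author's own statement) =====
-- stated objective: alternative
-- what changed: Replaces A's single left-to-right scan with a divide-and-conquer recursion: split the string in half, recursively compute (zero-hit count, final balance) on each half, threading the left half's final balance as the right half's offset.
import Mathlib
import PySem

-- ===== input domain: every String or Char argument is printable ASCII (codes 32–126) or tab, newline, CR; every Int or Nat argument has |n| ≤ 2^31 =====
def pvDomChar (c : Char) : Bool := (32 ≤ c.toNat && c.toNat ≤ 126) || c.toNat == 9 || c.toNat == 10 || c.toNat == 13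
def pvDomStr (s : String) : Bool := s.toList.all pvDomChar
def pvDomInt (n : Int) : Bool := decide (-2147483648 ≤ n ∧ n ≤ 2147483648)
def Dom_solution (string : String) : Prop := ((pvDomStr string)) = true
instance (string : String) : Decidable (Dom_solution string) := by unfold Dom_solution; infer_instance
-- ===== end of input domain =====

-- B replaces A's single scan by a divide-and-conquer recursion on string halves (alternative decomposition, same cost).

-- ===== PORT A =====
def solution (string : String) : Int :=
  (string.toList.foldl
    (fun (st : Int × Int) s =>
      let count : Int := if s = 'R' then st.1 + 1 else st.1 - 1
      let balance : Int := if count = 0 then st.2 + 1 else st.2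
      (count, balance))
    (0, 0)).2

-- ===== PORT B =====
-- go s offset = (zeros of running balance over s starting at offset, final balance)
def goB : List Char → Int → Int × Int
  | [], off => (0, off)
  | [c], off =>
      let t : Int := off + (if c = 'R' then 1 else -1)
      ((if t = 0 then 1 else 0), t)
  | a :: b :: t, off =>
      let mid := (a :: b :: t).length / 2
      let pl := goB ((a :: b :: t).take mid) off
      let pr := goB ((a :: b :: t).drop mid) pl.2
      (pl.1 + pr.1, pr.2)
termination_by l => l.length
decreasing_by
  · simp only [List.length_take, List.length_cons]; omega
  · simp only [List.length_drop, List.length_cons]; omega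

def solution_alt (string : String) : Int := (goB string.toList 0).1

-- ===== PRECONDITION & SPEC =====
def Spec_solution (string : String) (out : Int) : Prop := out = solution_alt string
instance (string : String) (out : Int) : Decidable (Spec_solution string out) := by unfold Spec_solution; infer_instance

-- ===== CLAIM (what is proved, stated in full; the proofs are below) =====
def Claim_equal_solution : Prop := ∀ (string : String), Dom_solution string → Spec_solution string (solution string)

-- ===== LEMMAS AND PROOFS =====

-- A's fold step and fold
def stepA (st : Int × Int) (s : Char) : Int × Int :=
  let count : Int := if s = 'R' then st.1 + 1 else st.1 - 1
  let balance : Int := if count = 0 then st.2 + 1 else st.2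
  (count, balance)

theorem foldA_shift (l : List Char) : ∀ (c b : Int),
    l.foldl stepA (c, b) = ((l.foldl stepA (c, 0)).1, b + (l.foldl stepA (c, 0)).2) := by
  induction l with
  | nil => intro c b; simp
  | cons x xs ih =>
      intro c b
      have h1 := ih (if x = 'R' then c + 1 else c - 1)
        (if (if x = 'R' then c + 1 else c - 1) = 0 then b + 1 else b)
      have h2 := ih (if x = 'R' then c + 1 else c - 1)
        (if (if x = 'R' then c + 1 else c - 1) = 0 then (0 : Int) + 1 else 0)
      simp only [List.foldl_cons, stepA]
      rw [h1, h2]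
      refine Prod.ext rfl ?_
      simp only
      split_ifs <;> omega

theorem goB_foldA : ∀ n (l : List Char), l.length ≤ n → ∀ (off : Int),
    goB l off = ((l.foldl stepA (off, 0)).2, (l.foldl stepA (off, 0)).1) := by
  intro n
  induction n with
  | zero =>
      intro l hl off
      have : l = [] := List.length_eq_zero_iff.mp (Nat.le_zero.mp hl)
      subst this; simp [goB]
  | succ n ih =>
      intro l hl off
      match l with
      | [] => simp [goB]
      | [c] => simp [goB, stepA, sub_eq_add_neg]; split <;> simp_all
      | a :: b :: t =>
          rw [goB]
          have hlen : (a :: b :: t).length = t.length + 2 := by simp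
          have hmid : 1 ≤ (a :: b :: t).length / 2 ∧ (a :: b :: t).length / 2 < (a :: b :: t).length := by omega
          set mid := (a :: b :: t).length / 2 with hm
          have h1 : ((a :: b :: t).take mid).length ≤ n := by
            simp only [List.length_take]; omega
          have h2 : ((a :: b :: t).drop mid).length ≤ n := by
            simp only [List.length_drop]; omega
          rw [ih _ h1, ih _ h2]
          have hsplit : (a :: b :: t) = (a :: b :: t).take mid ++ (a :: b :: t).drop mid :=
            (List.take_append_drop mid _).symm
          conv_rhs => rw [hsplit]
          rw [List.foldl_append]
          rw [foldA_shift ((a :: b :: t).drop mid) _ ((a :: b :: t).take mid |>.foldl stepA (off, 0)).2]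

-- ===== VERDICT (by name: the statement is the Claim_ definition above) =====
theorem solution_spec : Claim_equal_solution := by
  intro s _
  unfold Spec_solution solution solution_alt
  have h := goB_foldA s.toList.length s.toList le_rfl 0
  rw [h]
  rfl
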